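-- pv_equiv track=rewrite | github.com/Omarkh98/Internal-Guideline-Compliance-Checker | config/java_guidelines.py | java_rule_class_javadoc
-- ===== SOURCE A (Python) =====
-- def java_rule_class_javadoc(java_code: str) -> list[tuple[int, str]]:
--     """
--     Ensure every class has a Javadoc comment within the 3 lines above it.
--     """
--     violations = []
--     lines = java_code.splitlines()
--     for i, line in enumerate(lines):
--         stripped = line.strip()
--         if stripped.startswith("public class") or stripped.startswith("class"):
--             has_javadoc = False
--             # Look back up to 3 lines before class
--             for j in range(max(i - 3, 0), i):
--                 if lines[j].strip().startswith("/**"):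
--                     has_javadoc = True
--                     break
--             if not has_javadoc:
--                 violations.append((i + 1, "Missing Javadoc comment before class declaration."))
--     return violations
-- ===== SOURCE B (Python) =====
-- def java_rule_class_javadoc(java_code: str) -> list[tuple[int, str]]:
--     """
--     Ensure every class has a Javadoc comment within the 3 lines above it.
--     Single forward pass tracking the index of the most recent '/**' line.
--     """
--     violations = []
--     last_javadoc = -100
--     for i, line in enumerate(java_code.splitlines()):
--         stripped = line.strip()
--         if stripped.startswith("public class") or stripped.startswith("class"):
--             if not (i - last_javadoc <= 3):
--                 violations.append((i + 1, "Missing Javadoc comment before class declaration."))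
--         if stripped.startswith("/**"):
--             last_javadoc = i
--     return violations
-- ===== Notes on version B (the rewrite author's own statement) =====
-- stated objective: simpler
-- what changed: Replaces the nested bounded-lookback loop (re-stripping up to 3 earlier lines at every class declaration) by a single forward pass maintaining the index of the most recent Javadoc-opening line.
import Mathlib
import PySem

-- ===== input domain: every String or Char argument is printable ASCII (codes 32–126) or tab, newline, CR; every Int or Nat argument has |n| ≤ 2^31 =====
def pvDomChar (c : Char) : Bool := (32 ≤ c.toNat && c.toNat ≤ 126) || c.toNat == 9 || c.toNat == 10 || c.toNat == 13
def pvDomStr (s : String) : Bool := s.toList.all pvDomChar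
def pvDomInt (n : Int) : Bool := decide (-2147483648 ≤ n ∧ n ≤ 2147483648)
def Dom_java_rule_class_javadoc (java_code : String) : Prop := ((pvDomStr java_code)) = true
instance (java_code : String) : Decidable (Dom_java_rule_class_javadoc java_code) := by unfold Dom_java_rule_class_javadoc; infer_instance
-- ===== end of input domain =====

-- B replaces A's bounded lookback inner loop by one forward pass tracking the index of the most recent Javadoc-opening line (objective: simpler single-pass decomposition).

-- ===== PORT A =====
-- shared message literal
def jrMsg : String := "Missing Javadoc comment before class declaration."

-- 'lines[j].strip().startswith("/**")' — the inner-loop test of A, on an Int index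
def jrJdAt (lines : List String) (j : Int) : Bool :=
  PySem.Str.startswith (PySem.Str.strip (PySem.List.pyGetD lines j "")) "/**"

-- the lookback loop 'for j in range(max(i-3,0), i): … break' = any over that range
def jrHasJavadoc (lines : List String) (i : Int) : Bool :=
  (PySem.List.pyRange (max (i - 3) 0) i 1).any (jrJdAt lines)

def java_rule_class_javadoc (java_code : String) : List (Int × String) :=
  let lines := PySem.Str.splitlines java_code
  (PySem.List.enumerate lines).foldl
    (fun violations p =>
      let stripped := PySem.Str.strip p.2
      if PySem.Str.startswith stripped "public class" || PySem.Str.startswith stripped "class" then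
        if !(jrHasJavadoc lines p.1) then violations ++ [(p.1 + 1, jrMsg)] else violations
      else violations) []

-- ===== PORT B =====
-- the loop body of B: state = (last_javadoc, violations)
def jrStepB (st : Int × List (Int × String)) (p : Int × String) : Int × List (Int × String) :=
  let stripped := PySem.Str.strip p.2
  let violations :=
    if PySem.Str.startswith stripped "public class" || PySem.Str.startswith stripped "class" then
      if !(decide (p.1 - st.1 ≤ 3)) then st.2 ++ [(p.1 + 1, jrMsg)] else st.2
    else st.2
  let last := if PySem.Str.startswith stripped "/**" then p.1 else st.1
  (last, violations)

def java_rule_class_javadoc_alt (java_code : String) : List (Int × String) :=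
  ((PySem.List.enumerate (PySem.Str.splitlines java_code)).foldl jrStepB (-100, [])).2

-- ===== PRECONDITION & SPEC =====
def Spec_java_rule_class_javadoc (java_code : String) (out : List (Int × String)) : Prop := out = java_rule_class_javadoc_alt java_code
instance (java_code : String) (out : List (Int × String)) : Decidable (Spec_java_rule_class_javadoc java_code out) := by unfold Spec_java_rule_class_javadoc; infer_instance

-- ===== CLAIM (what is proved, stated in full; the proofs are below) =====
def Claim_equal_java_rule_class_javadoc : Prop := ∀ (java_code : String), Dom_java_rule_class_javadoc java_code → Spec_java_rule_class_javadoc java_code (java_rule_class_javadoc java_code)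

-- ===== LEMMAS AND PROOFS =====

-- invariant: last is the index of the most recent '/**' line below k, or the -100 sentinel
def jrInv (lines : List String) (k : Nat) (last : Int) : Prop :=
  (last = -100 ∧ ∀ j : Nat, j < k → jrJdAt lines j = false) ∨
  (∃ m : Nat, last = (m : Int) ∧ m < k ∧ jrJdAt lines m = true ∧
    ∀ j : Nat, m < j → j < k → jrJdAt lines j = false)

lemma jrHasJavadoc_iff (lines : List String) (k : Nat) :
    jrHasJavadoc lines (k : Int) = true ↔
      ∃ n : Nat, max ((k : Int) - 3) 0 ≤ (n : Int) ∧ n < k ∧ jrJdAt lines n = true := by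
  unfold jrHasJavadoc
  rw [List.any_eq_true]
  constructor
  · rintro ⟨j, hj, hjd⟩
    rw [PySem.List.mem_pyRange_one] at hj
    obtain ⟨h1, h2⟩ := hj
    have h0 : 0 ≤ j := le_trans (le_max_right _ _) h1
    refine ⟨j.toNat, ?_, ?_, ?_⟩
    · rwa [Int.toNat_of_nonneg h0]
    · omega
    · rw [Int.toNat_of_nonneg h0]; exact hjd
  · rintro ⟨n, h1, h2, h3⟩
    exact ⟨(n : Int), PySem.List.mem_pyRange_one.mpr ⟨h1, by exact_mod_cast h2⟩, h3⟩

lemma jrLookback (lines : List String) (k : Nat) (last : Int)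
    (hinv : jrInv lines k last) :
    jrHasJavadoc lines (k : Int) = decide ((k : Int) - last ≤ 3) := by
  rcases hinv with ⟨hs, hnone⟩ | ⟨m, hm, hmk, hjd, hafter⟩
  · have h1 : jrHasJavadoc lines (k : Int) = false := by
      rw [Bool.eq_false_iff]
      intro h
      obtain ⟨n, _, h2, h3⟩ := (jrHasJavadoc_iff lines k).mp h
      exact absurd h3 (by simp [hnone n h2])
    rw [h1, hs]
    symm; rw [decide_eq_false_iff_not]; omega
  · subst hm
    by_cases hle : (k : Int) - (m : Int) ≤ 3
    · rw [decide_eq_true hle]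
      exact (jrHasJavadoc_iff lines k).mpr ⟨m, by omega, hmk, hjd⟩
    · rw [decide_eq_false hle, Bool.eq_false_iff]
      intro h
      obtain ⟨n, h1, h2, h3⟩ := (jrHasJavadoc_iff lines k).mp h
      rcases lt_or_ge m n with hlt | hge
      · exact absurd h3 (by simp [hafter n hlt h2])
      · omega

lemma jrInv_step (lines : List String) (k : Nat) (last : Int)
    (hinv : jrInv lines k last) :
    jrInv lines (k + 1) (if jrJdAt lines (k : Int) = true then (k : Int) else last) := by
  by_cases hjd : jrJdAt lines (k : Int) = true
  · rw [if_pos hjd]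
    exact Or.inr ⟨k, rfl, Nat.lt_succ_self k, hjd, fun j h1 h2 => by omega⟩
  · rw [if_neg hjd]
    rw [Bool.not_eq_true] at hjd
    rcases hinv with ⟨hs, hnone⟩ | ⟨m, hm, hmk, hjm, hafter⟩
    · refine Or.inl ⟨hs, fun j hj => ?_⟩
      rcases Nat.lt_or_ge j k with h | h
      · exact hnone j h
      · have : j = k := by omega
        subst this; exact hjd
    · refine Or.inr ⟨m, hm, by omega, hjm, fun j h1 h2 => ?_⟩
      rcases Nat.lt_or_ge j k with h | h
      · exact hafter j h1 h
      · have : j = k := by omega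
        subst this; exact hjd

lemma jrDrop_head (lines rest : List String) (line : String) (k : Nat)
    (h : line :: rest = lines.drop k) :
    PySem.Str.strip line = PySem.Str.strip (PySem.List.pyGetD lines (k : Int) "") := by
  have hk : k < lines.length := by
    by_contra hk
    rw [List.drop_eq_nil_of_le (by omega)] at h
    exact List.cons_ne_nil _ _ h
  have hline : line = lines[k] := by
    have := congrArg (fun l => l.head?) h
    simpa [List.head?_drop, hk] using this
  rw [hline, PySem.List.pyGetD_natCast, List.getD_eq_getElem?_getD, List.getElem?_eq_getElem hk]
  rfl

lemma jrMain (lines : List String) (rest : List String) :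
    ∀ (k : Nat) (last : Int) (acc : List (Int × String)),
    rest = lines.drop k → jrInv lines k last →
    (PySem.List.enumerate rest (k : Int)).foldl
      (fun violations p =>
        let stripped := PySem.Str.strip p.2
        if PySem.Str.startswith stripped "public class" || PySem.Str.startswith stripped "class" then
          if !(jrHasJavadoc lines p.1) then violations ++ [(p.1 + 1, jrMsg)] else violations
        else violations) acc
      = ((PySem.List.enumerate rest (k : Int)).foldl jrStepB (last, acc)).2 := by
  induction rest with
  | nil => intro k last acc _ _; simp [PySem.List.enumerate_nil]
  | cons line rest' ih =>
    intro k last acc hrest hinv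
    have hstrip := jrDrop_head lines rest' line k hrest
    have hrest' : rest' = lines.drop (k + 1) := by
      have := congrArg List.tail hrest
      simpa [List.tail_drop] using this
    rw [PySem.List.enumerate_cons, List.foldl_cons, List.foldl_cons]
    have hcast : (k : Int) + 1 = ((k + 1 : Nat) : Int) := by push_cast; ring
    have hjdline : PySem.Str.startswith (PySem.Str.strip line) "/**" = jrJdAt lines (k : Int) := by
      rw [jrJdAt, hstrip]
    have hstepB : jrStepB (last, acc) ((k : Int), line)
        = ((if jrJdAt lines (k : Int) = true then (k : Int) else last),
           (if PySem.Str.startswith (PySem.Str.strip line) "public class"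
               || PySem.Str.startswith (PySem.Str.strip line) "class" then
              if !(jrHasJavadoc lines (k : Int)) then acc ++ [((k : Int) + 1, jrMsg)] else acc
            else acc)) := by
      rw [jrStepB]
      simp only [jrLookback lines k last hinv, hjdline]
    rw [hstepB, hcast]
    exact ih (k + 1) _ _ hrest' (jrInv_step lines k last hinv)

lemma jr_eq (java_code : String) :
    java_rule_class_javadoc java_code = java_rule_class_javadoc_alt java_code := by
  unfold java_rule_class_javadoc java_rule_class_javadoc_alt
  have := jrMain (PySem.Str.splitlines java_code) (PySem.Str.splitlines java_code) 0 (-100) []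
    (by simp) (Or.inl ⟨rfl, fun j hj => absurd hj (Nat.not_lt_zero j)⟩)
  simpa using this

-- ===== VERDICT (by name: the statement is the Claim_ definition above) =====
theorem java_rule_class_javadoc_spec : Claim_equal_java_rule_class_javadoc := by
  intro java_code _
  unfold Spec_java_rule_class_javadoc
  exact jr_eq java_code
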